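-- pv_equiv track=rewrite | github.com/mfaleni/The_Accountant | parser.py | _best_header_match
-- ===== SOURCE A (Python) =====
-- from typing import Optional, List, Tuple
--
-- DATE_HEADERS = {"date","transaction date","posted date","posting date","transaction_date","posteddate"}
--
-- DESC_HEADERS = {"description","memo","details","payee","original description","name","narrative","cleaned_description"}
--
-- AMOUNT_HEADERS = {"amount","transaction amount","debit","credit","value","amount (usd)","amt"}
--
-- TYPE_HEADERS = {"type","dr/cr","credit/debit"}
--
-- def _best_header_match(columns: List[str]) -> Tuple[Optional[str], Optional[str], Optional[str], Optional[str]]: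
--     cols_lower = [c.strip().lower() for c in columns]
--     def find_from(cands):
--         for i, c in enumerate(cols_lower):
--             if c in cands:
--                 return columns[i]
--         return None
--     return (
--         find_from(DATE_HEADERS),
--         find_from(DESC_HEADERS),
--         find_from(AMOUNT_HEADERS),
--         find_from(TYPE_HEADERS),
--     )
-- ===== SOURCE B (Python) =====
-- DATE_HEADERS = {"date","transaction date","posted date","posting date","transaction_date","posteddate"}
-- DESC_HEADERS = {"description","memo","details","payee","original description","name","narrative","cleaned_description"}
-- AMOUNT_HEADERS = {"amount","transaction amount","debit","credit","value","amount (usd)","amt"}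
-- TYPE_HEADERS = {"type","dr/cr","credit/debit"}
--
-- def _best_header_match(columns):
--     # one dict lookup per column instead of four scans over the columns
--     table = {}
--     for idx, names in enumerate((DATE_HEADERS, DESC_HEADERS, AMOUNT_HEADERS, TYPE_HEADERS)):
--         for name in names:
--             table[name] = idx
--     slots = [None, None, None, None]
--     for col in columns:
--         idx = table.get(col.strip().lower())
--         if idx is not None and slots[idx] is None:
--             slots[idx] = col
--     return tuple(slots)
-- ===== Notes on version B (the rewrite author's own statement) =====
-- stated objective: faster
-- what changed: Replaces four separate scans over the columns (one per header set) by one merged header->slot dict and a single pass over the columns filling each slot on its first match.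
import Mathlib
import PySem

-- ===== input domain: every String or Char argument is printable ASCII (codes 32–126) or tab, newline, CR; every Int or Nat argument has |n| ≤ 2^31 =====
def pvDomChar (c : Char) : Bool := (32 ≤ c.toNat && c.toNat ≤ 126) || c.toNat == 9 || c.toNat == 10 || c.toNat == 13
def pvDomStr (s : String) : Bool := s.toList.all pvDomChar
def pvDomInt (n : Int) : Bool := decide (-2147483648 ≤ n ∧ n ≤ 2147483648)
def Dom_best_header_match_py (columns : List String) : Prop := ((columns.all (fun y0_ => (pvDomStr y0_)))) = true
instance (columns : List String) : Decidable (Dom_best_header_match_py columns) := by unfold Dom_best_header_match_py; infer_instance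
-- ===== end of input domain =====

-- B replaces A's four scans over the columns by one merged header→slot table and a single pass (alternative decomposition).

-- The four Python set literals: all elements distinct, so PySem.Set.ofList of each is this list itself.
def DATE_HEADERS : List String := ["date", "transaction date", "posted date", "posting date", "transaction_date", "posteddate"]
def DESC_HEADERS : List String := ["description", "memo", "details", "payee", "original description", "name", "narrative", "cleaned_description"]
def AMOUNT_HEADERS : List String := ["amount", "transaction amount", "debit", "credit", "value", "amount (usd)", "amt"]
def TYPE_HEADERS : List String := ["type", "dr/cr", "credit/debit"]

-- ===== PORT A =====
-- find_from: loop over enumerate(cols_lower), return columns[i] on first hit (zip of lowered with originals)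
def findFromA (cands : List String) : List (String × String) → Option String
  | [] => none
  | (c, orig) :: rest => if c ∈ cands then some orig else findFromA cands rest

def best_header_match_py (columns : List String) : Option String × Option String × Option String × Option String :=
  let colsLower := columns.map (fun c => PySem.Str.lower (PySem.Str.strip c))
  let pairs := colsLower.zip columns
  (findFromA DATE_HEADERS pairs, findFromA DESC_HEADERS pairs,
   findFromA AMOUNT_HEADERS pairs, findFromA TYPE_HEADERS pairs)

-- ===== PORT B =====
-- table built by the double loop of Source B: enumerate over the four sets, insert name ↦ idx
def headerTable : PySem.Dict String Int :=
  (PySem.List.enumerate [DATE_HEADERS, DESC_HEADERS, AMOUNT_HEADERS, TYPE_HEADERS]).foldl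
    (fun d p => p.2.foldl (fun d name => d.insert name p.1) d) PySem.Dict.empty

-- single pass: slots start None, a slot is set on its first match only
def goB : List String → (Option String × Option String × Option String × Option String) →
    Option String × Option String × Option String × Option String
  | [], st => st
  | col :: rest, (d, s, a, t) =>
    match headerTable.get? (PySem.Str.lower (PySem.Str.strip col)) with
    | none => goB rest (d, s, a, t)
    | some 0 => goB rest (if d = none then (some col, s, a, t) else (d, s, a, t))
    | some 1 => goB rest (if s = none then (d, some col, a, t) else (d, s, a, t))
    | some 2 => goB rest (if a = none then (d, s, some col, t) else (d, s, a, t))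
    | some _ => goB rest (if t = none then (d, s, a, some col) else (d, s, a, t))

def best_header_match_py_alt (columns : List String) : Option String × Option String × Option String × Option String :=
  goB columns (none, none, none, none)

-- ===== PRECONDITION & SPEC =====
def Spec_best_header_match_py (columns : List String) (out : Option String × Option String × Option String × Option String) : Prop := out = best_header_match_py_alt columns
instance (columns : List String) (out : Option String × Option String × Option String × Option String) : Decidable (Spec_best_header_match_py columns out) := by unfold Spec_best_header_match_py; infer_instance

-- ===== CLAIM (what is proved, stated in full; the proofs are below) =====
def Claim_equal_best_header_match_py : Prop := ∀ (columns : List String), Dom_best_header_match_py columns → Spec_best_header_match_py columns (best_header_match_py columns)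

-- ===== LEMMAS AND PROOFS =====

def fA (cands : List String) (cs : List String) : Option String :=
  findFromA cands ((cs.map (fun c => PySem.Str.lower (PySem.Str.strip c))).zip cs)

lemma keys_headerTable : headerTable.keys = DATE_HEADERS ++ DESC_HEADERS ++ AMOUNT_HEADERS ++ TYPE_HEADERS := by decide

lemma get?_date {k : String} (h : k ∈ DATE_HEADERS) : headerTable.get? k = some 0 := by
  fin_cases h <;> decide

lemma get?_desc {k : String} (h : k ∈ DESC_HEADERS) : headerTable.get? k = some 1 := by
  fin_cases h <;> decide

lemma get?_amount {k : String} (h : k ∈ AMOUNT_HEADERS) : headerTable.get? k = some 2 := by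
  fin_cases h <;> decide

lemma get?_type {k : String} (h : k ∈ TYPE_HEADERS) : headerTable.get? k = some 3 := by
  fin_cases h <;> decide

lemma get?_none {k : String} (h1 : k ∉ DATE_HEADERS) (h2 : k ∉ DESC_HEADERS)
    (h3 : k ∉ AMOUNT_HEADERS) (h4 : k ∉ TYPE_HEADERS) : headerTable.get? k = none := by
  rw [PySem.Dict.get?_eq_none_iff_not_mem_keys, keys_headerTable]
  simp only [List.mem_append]
  tauto

lemma date_disj {k : String} (h : k ∈ DATE_HEADERS) :
    k ∉ DESC_HEADERS ∧ k ∉ AMOUNT_HEADERS ∧ k ∉ TYPE_HEADERS := by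
  fin_cases h <;> decide

lemma desc_disj {k : String} (h : k ∈ DESC_HEADERS) :
    k ∉ DATE_HEADERS ∧ k ∉ AMOUNT_HEADERS ∧ k ∉ TYPE_HEADERS := by
  fin_cases h <;> decide

lemma amount_disj {k : String} (h : k ∈ AMOUNT_HEADERS) :
    k ∉ DATE_HEADERS ∧ k ∉ DESC_HEADERS ∧ k ∉ TYPE_HEADERS := by
  fin_cases h <;> decide

lemma type_disj {k : String} (h : k ∈ TYPE_HEADERS) :
    k ∉ DATE_HEADERS ∧ k ∉ DESC_HEADERS ∧ k ∉ AMOUNT_HEADERS := by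
  fin_cases h <;> decide

lemma goB_eq : ∀ (cs : List String) (d s a t : Option String),
    goB cs (d, s, a, t) =
      (d.or (fA DATE_HEADERS cs), s.or (fA DESC_HEADERS cs),
       a.or (fA AMOUNT_HEADERS cs), t.or (fA TYPE_HEADERS cs)) := by
  intro cs
  induction cs with
  | nil => intro d s a t; simp [goB, fA, findFromA]
  | cons c rest ih =>
    intro d s a t
    have hpair : ∀ X, fA X (c :: rest) =
        if PySem.Str.lower (PySem.Str.strip c) ∈ X then some c else fA X rest := by
      intro X; simp [fA, findFromA]
    by_cases h1 : PySem.Str.lower (PySem.Str.strip c) ∈ DATE_HEADERS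
    · obtain ⟨n2, n3, n4⟩ := date_disj h1
      cases d with
      | none => simp [goB, get?_date h1, ih, hpair, h1, n2, n3, n4]
      | some v => simp [goB, get?_date h1, ih, hpair, h1, n2, n3, n4]
    · by_cases h2 : PySem.Str.lower (PySem.Str.strip c) ∈ DESC_HEADERS
      · obtain ⟨n1, n3, n4⟩ := desc_disj h2
        cases s with
        | none => simp [goB, get?_desc h2, ih, hpair, h2, n1, n3, n4]
        | some v => simp [goB, get?_desc h2, ih, hpair, h2, n1, n3, n4]
      · by_cases h3 : PySem.Str.lower (PySem.Str.strip c) ∈ AMOUNT_HEADERS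
        · obtain ⟨n1, n2, n4⟩ := amount_disj h3
          cases a with
          | none => simp [goB, get?_amount h3, ih, hpair, h3, n1, n2, n4]
          | some v => simp [goB, get?_amount h3, ih, hpair, h3, n1, n2, n4]
        · by_cases h4 : PySem.Str.lower (PySem.Str.strip c) ∈ TYPE_HEADERS
          · obtain ⟨n1, n2, n3⟩ := type_disj h4
            cases t with
            | none => simp [goB, get?_type h4, ih, hpair, h4, n1, n2, n3]
            | some v => simp [goB, get?_type h4, ih, hpair, h4, n1, n2, n3]
          · simp [goB, get?_none h1 h2 h3 h4, ih, hpair, h1, h2, h3, h4]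

-- ===== VERDICT (by name: the statement is the Claim_ definition above) =====
theorem best_header_match_py_spec : Claim_equal_best_header_match_py := by
  intro columns _
  unfold Spec_best_header_match_py best_header_match_py best_header_match_py_alt
  rw [goB_eq]
  rfl
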